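-- pv_equiv track=rewrite | github.com/kano-ai-org/kano-agent-backlog-skill | scripts/backlog/workitem_update_state.py | validate_ready
-- ===== SOURCE A (Python) =====
-- from typing import Dict, List, Optional, Tuple
--
-- READY_SECTIONS = [
--     "Context",
--     "Goal",
--     "Approach",
--     "Acceptance Criteria",
--     "Risks / Dependencies",
-- ]
--
-- def find_frontmatter(lines: List[str]) -> Tuple[int, int]:
--     if not lines or lines[0].strip() != "---":
--         return -1, -1
--     for idx in range(1, len(lines)):
--         if lines[idx].strip() == "---":
--             return 0, idx
--     return -1, -1
--
-- def strip_quotes(value: str) -> str: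
--     value = value.strip()
--     if len(value) >= 2 and value[0] == value[-1] and value[0] in ("\"", "'"):
--         return value[1:-1]
--     return value
--
-- def parse_frontmatter(lines: List[str]) -> Dict[str, str]:
--     start, end = find_frontmatter(lines)
--     if start == -1:
--         return {}
--     data: Dict[str, str] = {}
--     for line in lines[start + 1 : end]:
--         if ":" not in line:
--             continue
--         key, raw = line.split(":", 1)
--         data[key.strip()] = strip_quotes(raw)
--     return data
--
-- def section_map(lines: List[str]) -> Dict[str, List[str]]:
--     sections: Dict[str, List[str]] = {}
--     current = None
--     for line in lines:
--         if line.startswith("# "):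
--             current = line[2:].strip()
--             sections[current] = []
--             continue
--         if current:
--             sections[current].append(line)
--     return sections
--
-- def section_has_content(lines: List[str]) -> bool:
--     for line in lines:
--         stripped = line.strip()
--         if not stripped:
--             continue
--         if stripped.startswith("#"):
--             continue
--         return True
--     return False
--
-- def validate_ready(lines: List[str]) -> List[str]:
--     sections = section_map(lines)
--     data = parse_frontmatter(lines)
--     missing = []
--
--     # Check parent (required for non-Epic items)
--     parent = data.get("parent", "").strip()
--     item_type = data.get("type", "").strip()
--     if item_type != "Epic" and (not parent or parent.lower() == "null"):
--         missing.append("parent field (must not be null for non-Epic items)")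
--
--     for name in READY_SECTIONS:
--         if name not in sections or not section_has_content(sections[name]):
--             missing.append(f"Section: {name}")
--     return missing
-- ===== SOURCE B (Python) =====
-- from typing import Dict, List, Tuple
--
-- READY_SECTIONS = [
--     "Context",
--     "Goal",
--     "Approach",
--     "Acceptance Criteria",
--     "Risks / Dependencies",
-- ]
--
-- def find_frontmatter(lines: List[str]) -> Tuple[int, int]:
--     if not lines or lines[0].strip() != "---":
--         return -1, -1
--     for idx in range(1, len(lines)):
--         if lines[idx].strip() == "---":
--             return 0, idx
--     return -1, -1
--
-- def strip_quotes(value: str) -> str: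
--     value = value.strip()
--     if len(value) >= 2 and value[0] == value[-1] and value[0] in ("\"", "'"):
--         return value[1:-1]
--     return value
--
-- def parse_frontmatter(lines: List[str]) -> Dict[str, str]:
--     start, end = find_frontmatter(lines)
--     if start == -1:
--         return {}
--     data: Dict[str, str] = {}
--     for line in lines[start + 1 : end]:
--         if ":" not in line:
--             continue
--         key, raw = line.split(":", 1)
--         data[key.strip()] = strip_quotes(raw)
--     return data
--
-- def validate_ready(lines: List[str]) -> List[str]:
--     # Single pass over the lines: track the current header and a found-content
--     # flag per ready section, instead of building a full section map first.
--     data = parse_frontmatter(lines)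
--     found = {name: False for name in READY_SECTIONS}
--     current = None
--     for line in lines:
--         if line.startswith("# "):
--             current = line[2:].strip()
--             if current in found:
--                 found[current] = False  # last occurrence of a header wins
--         elif current in found:
--             stripped = line.strip()
--             if stripped and not stripped.startswith("#"):
--                 found[current] = True
--     missing = []
--     parent = data.get("parent", "").strip()
--     item_type = data.get("type", "").strip()
--     if item_type != "Epic" and (not parent or parent.lower() == "null"):
--         missing.append("parent field (must not be null for non-Epic items)")
--     for name in READY_SECTIONS:
--         if not found[name]:
--             missing.append(f"Section: {name}")
--     return missing
-- ===== Notes on version B (the rewrite author's own statement) =====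
-- stated objective: alternative
-- what changed: Replaces section_map (building a dict of full section bodies) plus a per-section content scan with a single pass over the lines that maintains the current header and one boolean found-content flag per ready section.
import Mathlib
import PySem

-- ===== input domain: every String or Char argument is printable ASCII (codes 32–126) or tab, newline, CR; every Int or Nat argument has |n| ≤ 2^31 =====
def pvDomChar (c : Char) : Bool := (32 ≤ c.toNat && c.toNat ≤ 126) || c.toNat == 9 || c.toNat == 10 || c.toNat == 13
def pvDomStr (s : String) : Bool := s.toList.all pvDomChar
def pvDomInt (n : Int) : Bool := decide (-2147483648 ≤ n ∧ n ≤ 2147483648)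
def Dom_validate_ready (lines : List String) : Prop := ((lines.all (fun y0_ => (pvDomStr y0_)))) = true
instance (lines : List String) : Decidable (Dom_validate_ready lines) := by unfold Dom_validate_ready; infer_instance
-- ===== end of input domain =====

-- B replaces the section_map dict of section bodies + per-section content scan by a
-- single pass keeping one found-content flag per ready section (alternative decomposition).

-- ===== PORT A =====
-- shared module constants/helpers (identical in Source A and Source B)
def READY_SECTIONS : List String :=
  ["Context", "Goal", "Approach", "Acceptance Criteria", "Risks / Dependencies"]

def ffLoop (lines : List String) : List Int → Int × Int
  | [] => (-1, -1)
  | idx :: rest =>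
      if PySem.Str.strip (PySem.List.pyGetD lines idx "") = "---" then (0, idx)
      else ffLoop lines rest

def find_frontmatter (lines : List String) : Int × Int :=
  if lines = [] ∨ PySem.Str.strip (PySem.List.pyGetD lines 0 "") ≠ "---" then (-1, -1)
  else ffLoop lines (PySem.List.pyRange 1 (lines.length : Int) 1)

def strip_quotes (value : String) : String :=
  let v := PySem.Str.strip value
  if 2 ≤ PySem.Str.len v ∧ PySem.Str.pyGet? v 0 = PySem.Str.pyGet? v (-1) ∧
      (PySem.Str.pyGet? v 0 = some '"' ∨ PySem.Str.pyGet? v 0 = some '\'') then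
    PySem.Str.slice v (some 1) (some (-1))
  else v

def parse_frontmatter (lines : List String) : PySem.Dict String String :=
  let se := find_frontmatter lines
  if se.1 = -1 then PySem.Dict.empty
  else
    (PySem.List.slice lines (some (se.1 + 1)) (some se.2)).foldl
      (fun d line =>
        if PySem.Str.isIn ":" line then
          match PySem.Str.splitMax? line ":" 1 with
          | some (key :: raw :: _) => d.insert (PySem.Str.strip key) (strip_quotes raw)
          | _ => d
        else d)
      PySem.Dict.empty

def section_map (lines : List String) : PySem.Dict String (List String) :=
  (lines.foldl
      (fun (st : PySem.Dict String (List String) × Option String) line =>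
        if PySem.Str.startswith line "# " then
          let c := PySem.Str.strip (PySem.Str.slice line (some 2) none)
          (st.1.insert c [], some c)
        else
          match st.2 with
          | some c => if c ≠ "" then (st.1.modify c [] (· ++ [line]), st.2) else (st.1, st.2)
          | none => (st.1, st.2))
      (PySem.Dict.empty, none)).1

def section_has_content : List String → Bool
  | [] => false
  | line :: rest =>
      let stripped := PySem.Str.strip line
      if stripped = "" then section_has_content rest
      else if PySem.Str.startswith stripped "#" then section_has_content rest
      else true

def validate_ready (lines : List String) : List String :=
  let sections := section_map lines
  let data := parse_frontmatter lines
  let missing : List String := []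
  let parent := PySem.Str.strip (data.getD "parent" "")
  let item_type := PySem.Str.strip (data.getD "type" "")
  let missing :=
    if item_type ≠ "Epic" ∧ (parent = "" ∨ PySem.Str.lower parent = "null") then
      missing ++ ["parent field (must not be null for non-Epic items)"]
    else missing
  READY_SECTIONS.foldl
    (fun m name =>
      if sections.contains name = false ∨ section_has_content (sections.getD name []) = false
      then m ++ ["Section: " ++ name]
      else m)
    missing

-- ===== PORT B =====
def validate_ready_alt (lines : List String) : List String :=
  let data := parse_frontmatter lines
  let found0 : PySem.Dict String Bool :=
    READY_SECTIONS.foldl (fun d n => d.insert n false) PySem.Dict.empty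
  let st :=
    lines.foldl
      (fun (st : PySem.Dict String Bool × Option String) line =>
        if PySem.Str.startswith line "# " then
          let c := PySem.Str.strip (PySem.Str.slice line (some 2) none)
          (if st.1.contains c then st.1.insert c false else st.1, some c)
        else
          match st.2 with
          | some c =>
            if st.1.contains c then
              let stripped := PySem.Str.strip line
              if stripped ≠ "" ∧ PySem.Str.startswith stripped "#" = false then
                (st.1.insert c true, st.2)
              else (st.1, st.2)
            else (st.1, st.2)
          | none => (st.1, st.2))
      (found0, none)
  let found := st.1
  let missing : List String := []
  let parent := PySem.Str.strip (data.getD "parent" "")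
  let item_type := PySem.Str.strip (data.getD "type" "")
  let missing :=
    if item_type ≠ "Epic" ∧ (parent = "" ∨ PySem.Str.lower parent = "null") then
      missing ++ ["parent field (must not be null for non-Epic items)"]
    else missing
  READY_SECTIONS.foldl
    (fun m name => if found.getD name false = false then m ++ ["Section: " ++ name] else m)
    missing

-- ===== PRECONDITION & SPEC =====
def Spec_validate_ready (lines : List String) (out : List String) : Prop := out = validate_ready_alt lines
instance (lines : List String) (out : List String) : Decidable (Spec_validate_ready lines out) := by unfold Spec_validate_ready; infer_instance

-- ===== CLAIM (what is proved, stated in full; the proofs are below) =====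
def Claim_equal_validate_ready : Prop := ∀ (lines : List String), Dom_validate_ready lines → Spec_validate_ready lines (validate_ready lines)

-- ===== LEMMAS AND PROOFS =====

-- a line counts as content for section_has_content
def contentLine (line : String) : Bool :=
  PySem.Str.strip line ≠ "" && !PySem.Str.startswith (PySem.Str.strip line) "#"

theorem section_has_content_eq_any (l : List String) :
    section_has_content l = l.any contentLine := by
  induction l with
  | nil => rfl
  | cons x rest ih =>
      simp only [section_has_content, contentLine, List.any_cons]
      by_cases h1 : PySem.Str.strip x = ""
      · simp [h1, ih]
      · by_cases h2 : PySem.Str.startswith (PySem.Str.strip x) "#" = true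
        · simp [h1, ih]
        · simp [h1, ih]

-- the invariant tying A's (sections, current) fold state to B's (found, current) state
def SInv (sections : PySem.Dict String (List String)) (found : PySem.Dict String Bool) : Prop :=
  (∀ k, found.contains k = decide (k ∈ READY_SECTIONS)) ∧
  (∀ name ∈ READY_SECTIONS,
    found.getD name false =
      (sections.contains name && (sections.getD name []).any contentLine))

def stepA (st : PySem.Dict String (List String) × Option String) (line : String) :
    PySem.Dict String (List String) × Option String :=
  if PySem.Str.startswith line "# " then
    let c := PySem.Str.strip (PySem.Str.slice line (some 2) none)
    (st.1.insert c [], some c)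
  else
    match st.2 with
    | some c => if c ≠ "" then (st.1.modify c [] (· ++ [line]), st.2) else (st.1, st.2)
    | none => (st.1, st.2)

def stepB (st : PySem.Dict String Bool × Option String) (line : String) :
    PySem.Dict String Bool × Option String :=
  if PySem.Str.startswith line "# " then
    let c := PySem.Str.strip (PySem.Str.slice line (some 2) none)
    (if st.1.contains c then st.1.insert c false else st.1, some c)
  else
    match st.2 with
    | some c =>
      if st.1.contains c then
        let stripped := PySem.Str.strip line
        if stripped ≠ "" ∧ PySem.Str.startswith stripped "#" = false then
          (st.1.insert c true, st.2)
        else (st.1, st.2)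
      else (st.1, st.2)
    | none => (st.1, st.2)

def CurOk (sections : PySem.Dict String (List String)) (cur : Option String) : Prop :=
  ∀ c, cur = some c → sections.contains c = true

theorem stepA_hdr (s : PySem.Dict String (List String)) (cur : Option String) (line : String)
    (h : PySem.Str.startswith line "# " = true) :
    stepA (s, cur) line = (s.insert (PySem.Str.strip (PySem.Str.slice line (some 2) none)) [],
      some (PySem.Str.strip (PySem.Str.slice line (some 2) none))) := by
  simp only [stepA]; rw [if_pos h]

theorem stepB_hdr (f : PySem.Dict String Bool) (cur : Option String) (line : String)
    (h : PySem.Str.startswith line "# " = true) :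
    stepB (f, cur) line = ((if f.contains (PySem.Str.strip (PySem.Str.slice line (some 2) none)) then
        f.insert (PySem.Str.strip (PySem.Str.slice line (some 2) none)) false else f),
      some (PySem.Str.strip (PySem.Str.slice line (some 2) none))) := by
  simp only [stepB]; rw [if_pos h]

theorem stepA_none (s : PySem.Dict String (List String)) (line : String)
    (h : ¬ PySem.Str.startswith line "# " = true) :
    stepA (s, none) line = (s, none) := by
  simp only [stepA]; rw [if_neg h]

theorem stepB_none (f : PySem.Dict String Bool) (line : String)
    (h : ¬ PySem.Str.startswith line "# " = true) :
    stepB (f, none) line = (f, none) := by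
  simp only [stepB]; rw [if_neg h]

theorem stepA_some (s : PySem.Dict String (List String)) (c : String) (line : String)
    (h : ¬ PySem.Str.startswith line "# " = true) :
    stepA (s, some c) line =
      (if c ≠ "" then (s.modify c [] (· ++ [line]), some c) else (s, some c)) := by
  simp only [stepA]; rw [if_neg h]


theorem stepB_some (f : PySem.Dict String Bool) (c : String) (line : String)
    (h : ¬ PySem.Str.startswith line "# " = true) :
    stepB (f, some c) line =
      (if f.contains c then
        (if PySem.Str.strip line ≠ "" ∧ PySem.Str.startswith (PySem.Str.strip line) "#" = false then
          (f.insert c true, some c) else (f, some c))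
       else (f, some c)) := by
  simp only [stepB]; rw [if_neg h]


theorem inv_step (sections : PySem.Dict String (List String)) (found : PySem.Dict String Bool)
    (cur : Option String) (line : String)
    (hinv : SInv sections found) (hcur : CurOk sections cur) :
    SInv (stepA (sections, cur) line).1 (stepB (found, cur) line).1 ∧
      CurOk (stepA (sections, cur) line).1 (stepA (sections, cur) line).2 ∧
      (stepA (sections, cur) line).2 = (stepB (found, cur) line).2 := by
  obtain ⟨h1, h2⟩ := hinv
  by_cases hs : PySem.Str.startswith line "# " = true
  · -- header line
    rw [stepA_hdr _ _ _ hs, stepB_hdr _ _ _ hs]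
    refine ⟨⟨?_, ?_⟩, ?_, rfl⟩
    · intro k
      show (PySem.Dict.contains _ k) = _
      by_cases hcc : found.contains (PySem.Str.strip (PySem.Str.slice line (some 2) none)) = true
      · have hcRS : PySem.Str.strip (PySem.Str.slice line (some 2) none) ∈ READY_SECTIONS :=
          of_decide_eq_true ((h1 _) ▸ hcc)
        rw [if_pos hcc, PySem.Dict.contains_insert, h1 k]
        by_cases hk : k = PySem.Str.strip (PySem.Str.slice line (some 2) none)
        · subst hk; simp [hcRS]
        · simp [hk]
      · rw [if_neg hcc]; exact h1 k
    · intro name hname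
      show (PySem.Dict.getD _ name false) = _
      by_cases hnc : name = PySem.Str.strip (PySem.Str.slice line (some 2) none)
      · have hfc : found.contains (PySem.Str.strip (PySem.Str.slice line (some 2) none)) = true := by
          rw [h1]; exact decide_eq_true (hnc ▸ hname)
        rw [← hnc] at hfc ⊢
        rw [if_pos hfc, PySem.Dict.getD_insert_self, PySem.Dict.contains_insert_self,
          PySem.Dict.getD_insert_self, List.any_nil]
        rfl
      · have hgB : (if found.contains (PySem.Str.strip (PySem.Str.slice line (some 2) none)) then
              found.insert (PySem.Str.strip (PySem.Str.slice line (some 2) none)) false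
            else found).getD name false = found.getD name false := by
          split
          · exact PySem.Dict.getD_insert_of_ne _ _ _ hnc
          · rfl
        have hb : (name == PySem.Str.strip (PySem.Str.slice line (some 2) none)) = false := by
          simp [hnc]
        rw [hgB, PySem.Dict.contains_insert, PySem.Dict.getD_insert_of_ne _ _ _ hnc,
          h2 name hname, hb, Bool.false_or]
    · intro c' e
      injection e with e; subst e
      exact PySem.Dict.contains_insert_self _ _ _
  · -- non-header line
    cases cur with
    | none =>
        rw [stepA_none _ _ hs, stepB_none _ _ hs]
        exact ⟨⟨h1, h2⟩, hcur, rfl⟩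
    | some c =>
      rw [stepA_some _ _ _ hs, stepB_some _ _ _ hs]
      have hsc : sections.contains c = true := hcur c rfl
      by_cases hcm : c ∈ READY_SECTIONS
      · -- the current section is a tracked ready section
        have hne : c ≠ "" := by intro h; rw [h] at hcm; revert hcm; decide
        have hfc : found.contains c = true := by rw [h1]; exact decide_eq_true hcm
        rw [if_pos hne, if_pos hfc]
        refine ⟨⟨?_, ?_⟩, ?_, ?_⟩
        · intro k
          show (PySem.Dict.contains _ k) = _
          split
          · rw [PySem.Dict.contains_insert, h1 k]
            by_cases hk : k = c
            · subst hk; simp [hcm]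
            · simp [hk]
          · exact h1 k
        · intro name hname
          show (PySem.Dict.getD _ name false) = _
          by_cases hnc : name = c
          · subst hnc
            rw [PySem.Dict.contains_modify, PySem.Dict.getD_modify_self]
            split
            · rename_i hcl
              have hclt : contentLine line = true := by
                unfold contentLine; rw [hcl.2]; simp [hcl.1]
              rw [PySem.Dict.getD_insert_self]
              simp only [List.any_append, List.any_cons, List.any_nil, hclt, Bool.or_false,
                Bool.or_true, BEq.rfl, Bool.true_or, Bool.true_and]
            · rename_i hcl
              have hclf : contentLine line = false := by
                unfold contentLine
                by_cases hst : PySem.Str.strip line = ""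
                · simp [hst]
                · have hsw : PySem.Str.startswith (PySem.Str.strip line) "#" = true := by
                    by_contra hsw
                    exact hcl ⟨hst, by simpa using hsw⟩
                  rw [hsw]; simp
              rw [h2 name hname, hsc]
              simp only [List.any_append, List.any_cons, List.any_nil, hclf, Bool.or_false,
                BEq.rfl, Bool.true_or, Bool.true_and]
          · rw [PySem.Dict.contains_modify, PySem.Dict.getD_modify_of_ne _ _ _ hnc]
            have : (name == c) = false := by simp [hnc]
            rw [this, Bool.false_or]
            split
            · rw [PySem.Dict.getD_insert_of_ne _ _ _ hnc]; exact h2 name hname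
            · exact h2 name hname
        · intro c' e
          injection e with e; subst e
          rw [PySem.Dict.contains_modify]; simp
        · show some c = _
          split <;> rfl
      · -- the current section is not a tracked ready section
        have hfc : found.contains c = false := by rw [h1]; exact decide_eq_false hcm
        rw [hfc]
        simp only [Bool.false_eq_true, if_false]
        refine ⟨⟨h1, ?_⟩, ?_, ?_⟩
        · intro name hname
          have hnc : name ≠ c := fun h => hcm (h ▸ hname)
          show (PySem.Dict.getD _ name false) = _
          split
          · rw [PySem.Dict.contains_modify, PySem.Dict.getD_modify_of_ne _ _ _ hnc]
            have : (name == c) = false := by simp [hnc]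
            rw [this, Bool.false_or]
            exact h2 name hname
          · exact h2 name hname
        · intro c' e
          have e2 : (if c ≠ "" then (sections.modify c [] (· ++ [line]), some c)
              else (sections, some c)).2 = some c := by split <;> rfl
          rw [e2] at e
          injection e with e; subst e
          split
          · rw [PySem.Dict.contains_modify]; simp
          · exact hsc
        · show (if c ≠ "" then (sections.modify c [] (· ++ [line]), some c)
              else (sections, some c)).2 = some c
          split <;> rfl

theorem inv_foldl (lines : List String) : ∀ (sections : PySem.Dict String (List String))
    (found : PySem.Dict String Bool) (cur : Option String),
    SInv sections found → CurOk sections cur →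
    SInv (lines.foldl stepA (sections, cur)).1 (lines.foldl stepB (found, cur)).1 := by
  induction lines with
  | nil => intro s f c hi _; exact hi
  | cons x rest ih =>
      intro s f c hi hc
      obtain ⟨hi', hc', he⟩ := inv_step s f c x hi hc
      have eA : stepA (s, c) x = ((stepA (s, c) x).1, (stepA (s, c) x).2) := rfl
      have eB : stepB (f, c) x = ((stepB (f, c) x).1, (stepA (s, c) x).2) := by rw [he]
      simp only [List.foldl_cons]
      rw [eA, eB]
      exact ih _ _ _ hi' hc'

def found0 : PySem.Dict String Bool :=
  READY_SECTIONS.foldl (fun d n => d.insert n false) PySem.Dict.empty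

theorem inv_init : SInv PySem.Dict.empty found0 := by
  constructor
  · intro k
    have e : found0 = PySem.Dict.mk [("Context", false), ("Goal", false), ("Approach", false),
        ("Acceptance Criteria", false), ("Risks / Dependencies", false)] := by decide
    rw [e, PySem.Dict.contains_mk]
    by_cases hk : k ∈ READY_SECTIONS
    · rw [decide_eq_true hk]
      simp only [READY_SECTIONS, List.mem_cons, List.not_mem_nil, or_false] at hk
      rcases hk with rfl | rfl | rfl | rfl | rfl <;> decide
    · rw [decide_eq_false hk]
      simp only [READY_SECTIONS, List.mem_cons, List.not_mem_nil, or_false, not_or] at hk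
      obtain ⟨n1, n2, n3, n4, n5⟩ := hk
      simp [Ne.symm n1, Ne.symm n2, Ne.symm n3, Ne.symm n4, Ne.symm n5]
  · intro name hname
    simp only [READY_SECTIONS, List.mem_cons, List.not_mem_nil, or_false] at hname
    rcases hname with rfl | rfl | rfl | rfl | rfl <;> decide

theorem validate_ready_eq_alt (lines : List String) :
    validate_ready lines = validate_ready_alt lines := by
  have key := (inv_foldl lines PySem.Dict.empty found0 none inv_init (by intro c e; cases e)).2
  unfold validate_ready validate_ready_alt
  refine PySem.List.foldl_congr_mem _ _ _ _ (fun acc name hname => ?_)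
  have h := key name hname
  have hsm : section_map lines = (lines.foldl stepA (PySem.Dict.empty, (none : Option String))).1 := rfl
  have hiff : ((section_map lines).contains name = false ∨
      section_has_content ((section_map lines).getD name []) = false) ↔
      ((lines.foldl stepB (found0, (none : Option String))).1.getD name false = false) := by
    rw [section_has_content_eq_any, hsm, h]
    cases (lines.foldl stepA (PySem.Dict.empty, (none : Option String))).1.contains name <;>
      cases ((lines.foldl stepA (PySem.Dict.empty, (none : Option String))).1.getD name []).any contentLine <;>
      simp
  exact if_congr hiff rfl rfl

-- ===== VERDICT (by name: the statement is the Claim_ definition above) =====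
theorem validate_ready_spec : Claim_equal_validate_ready := by
  intro lines _
  show validate_ready lines = validate_ready_alt lines
  exact validate_ready_eq_alt lines
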